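-- pv_equiv track=rewrite | github.com/nablarch/nabledge-dev | tools/rbkc/scripts/create/converters/xlsx_common.py | _compose_header_columns
-- ===== SOURCE A (Python) =====
-- SEP = " / "
--
-- def _compose_header_columns(header_rows: list[list[str]], col_count: int) -> list[str]:
--     """Span-inherit composition (spec §8-3, Phase 22-B-12).
--
--     Two distinct roles:
--
--     * **The top row** (``header_rows[0]``) is the primary header.  Each
--       non-empty cell spans rightward until the next non-empty cell in
--       the same row — but only over columns that have no value in their
--       own top-row cell.  This handles the v5 bessatsu pattern where the
--       top row has only scattered parent labels and the bottom row
--       carries the per-column leaves.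
--     * **Rows below the top** are sub-headers that split specific
--       top-row spans.  A sub-header cell at column ``c`` appends to the
--       top-row label that covers column ``c``.
--
--     Composed column = ``SEP.join([top_label, sub_label_1, sub_label_2, ...])``
--     with empty parts dropped.  A column where the top row is empty AND
--     no sub-header covers it yields "".
--     """
--     if not header_rows:
--         return [""] * col_count
--     top_row = header_rows[0]
--     sub_rows = header_rows[1:]
--
--     # Step 1: compute the primary label per column.
--     #
--     # A top-row value V at column t covers columns [t, next_top_col).
--     # Within that span, we inherit V to column c ONLY IF at least one
--     # sub-header cell exists in [t, next_top_col) — i.e. V genuinely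
--     # spans over sub-cells.  Otherwise V stays at column t only (it's
--     # a standalone single-row header cell with an empty neighbour, not
--     # a span parent).
--     top_cols = [c for c in range(col_count)
--                 if c < len(top_row) and top_row[c]]
--     # Columns that any sub row has a value at.
--     sub_cols = set()
--     for sr in sub_rows:
--         for c in range(min(col_count, len(sr))):
--             if sr[c]:
--                 sub_cols.add(c)
--
--     primary: list[str] = [""] * col_count
--     for i, t in enumerate(top_cols):
--         next_t = top_cols[i + 1] if i + 1 < len(top_cols) else col_count
--         label = _flatten_ws(top_row[t])
--         # Does this top cell span over ≥ 2 sub-cells?  If not, it stays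
--         # at column t alone (no inherit).
--         sub_in_span = [c for c in sub_cols if t <= c < next_t]
--         if len(sub_in_span) >= 2:
--             for c in range(t, next_t):
--                 primary[c] = label
--         else:
--             primary[t] = label
--
--     # Step 2: attach sub-header labels per column.  A sub-header value
--     # at column c becomes a part appended after the primary label for
--     # column c.
--     composed: list[str] = []
--     for c in range(col_count):
--         parts: list[str] = []
--         if primary[c]:
--             parts.append(primary[c])
--         for sr in sub_rows:
--             v = _flatten_ws(sr[c]) if c < len(sr) and sr[c] else ""
--             if v:
--                 parts.append(v)
--         # Dedup consecutive identical parts (e.g. single-row header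
--         # where top == sub would duplicate).
--         dedup: list[str] = []
--         for p in parts:
--             if not dedup or dedup[-1] != p:
--                 dedup.append(p)
--         composed.append(SEP.join(dedup))
--     return composed
--
-- def _flatten_ws(s: str) -> str:
--     """Collapse embedded whitespace/newlines to single spaces."""
--     return " ".join(s.split())
-- ===== SOURCE B (Python) =====
-- # Same values as A: prefix sums over the sub-columns make each span's
-- # sub-cell count an O(1) difference instead of a rescan of the whole set,
-- # and the composition step is rebuilt as per-column comprehensions.
-- SEP = " / "
--
--
-- def _flatten_ws(s: str) -> str:
--     """Collapse embedded whitespace/newlines to single spaces."""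
--     return " ".join(s.split())
--
--
-- def _dedup_adjacent(parts: list[str]) -> list[str]:
--     """Drop consecutive duplicate entries."""
--     if not parts:
--         return []
--     return [parts[0]] + [p for q, p in zip(parts, parts[1:]) if p != q]
--
--
-- def _compose_header_columns(header_rows: list[list[str]], col_count: int) -> list[str]:
--     if not header_rows:
--         return [""] * col_count
--     top_row = header_rows[0]
--     sub_rows = header_rows[1:]
--
--     sub_cols = set()
--     for sr in sub_rows:
--         for c in range(min(col_count, len(sr))):
--             if sr[c]:
--                 sub_cols.add(c)
--     # pref[k] = how many sub-columns lie below column k; a span's sub-cell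
--     # count is then pref[next_t] - pref[t].
--     pref = [0]
--     for c in range(col_count):
--         pref.append(pref[-1] + (1 if c in sub_cols else 0))
--
--     top_cols = [c for c in range(col_count)
--                 if c < len(top_row) and top_row[c]]
--     primary = [""] * col_count
--     for i, t in enumerate(top_cols):
--         next_t = top_cols[i + 1] if i + 1 < len(top_cols) else col_count
--         label = _flatten_ws(top_row[t])
--         if pref[next_t] - pref[t] >= 2:
--             for c in range(t, next_t):
--                 primary[c] = label
--         else:
--             primary[t] = label
--
--     return [SEP.join(_dedup_adjacent(
--                 [p for p in [primary[c]]
--                        + [_flatten_ws(sr[c]) for sr in sub_rows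
--                           if c < len(sr) and sr[c]]
--                  if p]))
--             for c in range(col_count)]
-- ===== Notes on version B (the rewrite author's own statement) =====
-- stated objective: alternative
-- what changed: A prefix-sum array over the sub-columns turns each top-cell span's sub-cell count into an O(1) difference, removing A's rescan of the whole sub_cols set per top cell, and the composition step is rebuilt as per-column comprehensions with a zip-based adjacent-dedup instead of accumulator loops.
import Mathlib
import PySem

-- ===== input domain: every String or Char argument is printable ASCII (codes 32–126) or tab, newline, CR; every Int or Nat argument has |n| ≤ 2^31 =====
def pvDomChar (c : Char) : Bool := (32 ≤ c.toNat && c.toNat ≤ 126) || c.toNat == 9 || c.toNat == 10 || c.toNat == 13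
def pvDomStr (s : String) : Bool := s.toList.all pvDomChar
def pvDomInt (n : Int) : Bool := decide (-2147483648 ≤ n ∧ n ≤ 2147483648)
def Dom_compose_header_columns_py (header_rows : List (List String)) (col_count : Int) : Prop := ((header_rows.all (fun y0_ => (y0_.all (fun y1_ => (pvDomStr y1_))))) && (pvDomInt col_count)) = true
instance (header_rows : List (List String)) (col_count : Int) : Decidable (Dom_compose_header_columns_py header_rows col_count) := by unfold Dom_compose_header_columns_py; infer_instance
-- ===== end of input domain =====

-- B replaces A's per-top-cell rescan of the sub_cols set by a prefix-sum span count (objective: alternative).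

-- ===== PORT A =====
-- _flatten_ws(s) = " ".join(s.split())
def flattenWs (s : String) : String := PySem.Str.join " " (PySem.Str.split₀ s)

-- top_cols = [c for c in range(col_count) if c < len(top_row) and top_row[c]]
def aTopCols (top_row : List String) (col_count : Int) : List Int :=
  (PySem.List.pyRange 0 col_count 1).filter
    (fun c => decide (c < PySem.List.len top_row) && (PySem.List.pyGetD top_row c "" != ""))

-- sub_cols = set(); for sr in sub_rows: for c in range(min(col_count, len(sr))): if sr[c]: sub_cols.add(c)
def aSubCols (sub_rows : List (List String)) (col_count : Int) : PySem.Set Int :=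
  sub_rows.foldl (fun s sr =>
    (PySem.List.pyRange 0 (min col_count (PySem.List.len sr)) 1).foldl
      (fun s c => if PySem.List.pyGetD sr c "" != "" then PySem.Set.add s c else s) s)
    PySem.Set.empty

-- the body of 'for i, t in enumerate(top_cols): …' (it = (i, t)); only len(sub_in_span) is
-- consumed, so filtering the set's underlying list is exact (iteration order never escapes)
def aPrimaryStep (top_row : List String) (top_cols : List Int) (sub_cols : PySem.Set Int)
    (col_count : Int) (primary : List String) (it : Int × Int) : List String :=
  let next_t : Int := if it.1 + 1 < PySem.List.len top_cols
      then PySem.List.pyGetD top_cols (it.1 + 1) 0 else col_count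
  let label := flattenWs (PySem.List.pyGetD top_row it.2 "")
  let sub_in_span := sub_cols.filter (fun c => decide (it.2 ≤ c) && decide (c < next_t))
  if 2 ≤ PySem.List.len sub_in_span then
    (PySem.List.pyRange it.2 next_t 1).foldl (fun pr c => PySem.List.pySetD pr c label) primary
  else PySem.List.pySetD primary it.2 label

-- the body of the step-2 loop for one column c (parts / dedup / SEP.join)
def aCompose (primary : List String) (sub_rows : List (List String)) (c : Int) : String :=
  let parts : List String :=
    if PySem.List.pyGetD primary c "" != "" then [PySem.List.pyGetD primary c ""] else []
  let parts := sub_rows.foldl (fun parts sr =>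
    let v := if decide (c < PySem.List.len sr) && (PySem.List.pyGetD sr c "" != "")
             then flattenWs (PySem.List.pyGetD sr c "") else ""
    if v != "" then parts ++ [v] else parts) parts
  let dedup := parts.foldl (fun d p =>
    if decide (d = []) || (PySem.List.pyGetD d (-1) "" != p) then d ++ [p] else d) ([] : List String)
  PySem.Str.join " / " dedup

def compose_header_columns_py (header_rows : List (List String)) (col_count : Int) : List String :=
  match header_rows with
  | [] => List.replicate col_count.toNat ""    -- [""] * col_count (negative count gives [])
  | top_row :: sub_rows =>
    let top_cols := aTopCols top_row col_count
    let sub_cols := aSubCols sub_rows col_count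
    let primary := (PySem.List.enumerate top_cols 0).foldl
      (aPrimaryStep top_row top_cols sub_cols col_count) (List.replicate col_count.toNat "")
    (PySem.List.pyRange 0 col_count 1).foldl
      (fun composed c => composed ++ [aCompose primary sub_rows c]) []

-- ===== PORT B =====
-- _dedup_adjacent(parts) = [parts[0]] + [p for q, p in zip(parts, parts[1:]) if p != q]
def bDedupAdjacent (parts : List String) : List String :=
  match parts with
  | [] => []
  | h :: t => h :: ((h :: t).zip t).filterMap (fun qp => if qp.2 != qp.1 then some qp.2 else none)

-- pref = [0]; for c in range(col_count): pref.append(pref[-1] + (1 if c in sub_cols else 0))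
def bPref (sub_cols : PySem.Set Int) (col_count : Int) : List Int :=
  (PySem.List.pyRange 0 col_count 1).foldl
    (fun pr c => pr ++ [PySem.List.pyGetD pr (-1) 0
      + (if PySem.Set.contains sub_cols c then 1 else 0)]) [0]

-- loop body of 'for i, t in enumerate(top_cols)': the span's sub-cell count is pref[next_t]-pref[t]
def bPrimaryStep (top_row : List String) (top_cols : List Int) (pref : List Int)
    (col_count : Int) (primary : List String) (it : Int × Int) : List String :=
  let next_t : Int := if it.1 + 1 < PySem.List.len top_cols
      then PySem.List.pyGetD top_cols (it.1 + 1) 0 else col_count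
  let label := flattenWs (PySem.List.pyGetD top_row it.2 "")
  if 2 ≤ PySem.List.pyGetD pref next_t 0 - PySem.List.pyGetD pref it.2 0 then
    (PySem.List.pyRange it.2 next_t 1).foldl (fun pr c => PySem.List.pySetD pr c label) primary
  else PySem.List.pySetD primary it.2 label

-- SEP.join(_dedup_adjacent([p for p in [primary[c]] + [...] if p]))
def bCompose (primary : List String) (sub_rows : List (List String)) (c : Int) : String :=
  PySem.Str.join " / " (bDedupAdjacent
    ((PySem.List.pyGetD primary c "" :: sub_rows.filterMap (fun sr =>
        if decide (c < PySem.List.len sr) && (PySem.List.pyGetD sr c "" != "")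
        then some (flattenWs (PySem.List.pyGetD sr c "")) else none)).filter (fun p => p != "")))

def compose_header_columns_py_alt (header_rows : List (List String)) (col_count : Int) : List String :=
  match header_rows with
  | [] => List.replicate col_count.toNat ""
  | top_row :: sub_rows =>
    let sub_cols := aSubCols sub_rows col_count    -- the same row-major pass as A builds it
    let pref := bPref sub_cols col_count
    let top_cols := aTopCols top_row col_count
    let primary := (PySem.List.enumerate top_cols 0).foldl
      (bPrimaryStep top_row top_cols pref col_count) (List.replicate col_count.toNat "")
    (PySem.List.pyRange 0 col_count 1).map (bCompose primary sub_rows)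

-- ===== PRECONDITION & SPEC =====
def Spec_compose_header_columns_py (header_rows : List (List String)) (col_count : Int) (out : List String) : Prop := out = compose_header_columns_py_alt header_rows col_count
instance (header_rows : List (List String)) (col_count : Int) (out : List String) : Decidable (Spec_compose_header_columns_py header_rows col_count out) := by unfold Spec_compose_header_columns_py; infer_instance

-- ===== CLAIM (what is proved, stated in full; the proofs are below) =====
def Claim_equal_compose_header_columns_py : Prop := ∀ (header_rows : List (List String)) (col_count : Int), Dom_compose_header_columns_py header_rows col_count → Spec_compose_header_columns_py header_rows col_count (compose_header_columns_py header_rows col_count)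

-- ===== LEMMAS AND PROOFS =====

-- running prefix sums of membership weights starting from a
def psums (S : PySem.Set Int) : List Int → Int → List Int
  | [], _ => []
  | c :: l, a => (a + (if PySem.Set.contains S c then 1 else 0))
      :: psums S l (a + (if PySem.Set.contains S c then 1 else 0))

-- 'chain q l' = the adjacent-dedup of l given the previous kept element q
def chainDedup : String → List String → List String
  | _, [] => []
  | q, p :: l => if p != q then p :: chainDedup p l else chainDedup p l

theorem nodup_addif_fold (l : List Int) (p : Int → Bool) (s : PySem.Set Int) (h : s.Nodup) :
    (l.foldl (fun s c => if p c then PySem.Set.add s c else s) s).Nodup := by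
  induction l generalizing s with
  | nil => exact h
  | cons x l ih =>
    simp only [List.foldl_cons]
    by_cases hx : p x
    · simp only [hx, if_true]
      exact ih _ (PySem.Set.nodup_add s x h)
    · simp only [hx, Bool.false_eq_true, if_false]
      exact ih _ h

theorem nodup_aSubCols (sub_rows : List (List String)) (n : Int) : (aSubCols sub_rows n).Nodup := by
  unfold aSubCols
  have key : ∀ (rows : List (List String)) (s : PySem.Set Int), s.Nodup →
      (rows.foldl (fun s sr =>
        (PySem.List.pyRange 0 (min n (PySem.List.len sr)) 1).foldl
          (fun s c => if PySem.List.pyGetD sr c "" != "" then PySem.Set.add s c else s) s) s).Nodup := by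
    intro rows
    induction rows with
    | nil => exact fun s h => h
    | cons r rows ih =>
      intro s hs
      simp only [List.foldl_cons]
      exact ih _ (nodup_addif_fold _ _ _ hs)
  exact key _ _ List.nodup_nil

theorem pref_build (S : PySem.Set Int) (l : List Int) (acc : List Int) (a : Int) :
    l.foldl (fun pr c => pr ++ [PySem.List.pyGetD pr (-1) 0
        + (if PySem.Set.contains S c then 1 else 0)]) (acc ++ [a])
      = (acc ++ [a]) ++ psums S l a := by
  induction l generalizing acc a with
  | nil => simp [psums]
  | cons c l ih =>
    simp only [List.foldl_cons]
    have hget : PySem.List.pyGetD (acc ++ [a]) (-1) 0 = a := by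
      rw [PySem.List.pyGetD_neg_ofNat (acc ++ [a]) 1 0 (by omega) (by simp)]
      simp
    rw [hget]
    have h2 := ih (acc ++ [a]) (a + (if PySem.Set.contains S c then 1 else 0))
    rw [List.append_assoc] at h2 ⊢
    rw [h2]
    simp [psums]

theorem bPref_eq (S : PySem.Set Int) (n : Int) :
    bPref S n = 0 :: psums S (PySem.List.pyRange 0 n 1) 0 := by
  have := pref_build S (PySem.List.pyRange 0 n 1) [] 0
  simpa [bPref] using this

theorem psums_getElem? (S : PySem.Set Int) (l : List Int) (a : Int) (k : Nat) (hk : k ≤ l.length) :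
    (a :: psums S l a)[k]? = some (a + (((l.take k).countP (fun c => PySem.Set.contains S c)) : Int)) := by
  induction l generalizing a k with
  | nil =>
    have hk0 : k = 0 := Nat.le_zero.mp hk
    subst hk0
    simp
  | cons c l ih =>
    cases k with
    | zero => simp
    | succ j =>
      simp only [psums, List.getElem?_cons_succ]
      rw [ih (a + (if PySem.Set.contains S c then 1 else 0)) j (by simpa using hk)]
      simp only [List.take_succ_cons, List.countP_cons]
      congr 1
      by_cases hc : PySem.Set.contains S c <;> simp [hc] <;> push_cast <;> try ring

theorem getD_pref (S : PySem.Set Int) (l : List Int) (k : Int) (h0 : 0 ≤ k) (h1 : k ≤ l.length) :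
    PySem.List.pyGetD (0 :: psums S l 0) k 0
      = ((((l.take k.toNat).countP (fun c => PySem.Set.contains S c)) : Nat) : Int) := by
  rw [PySem.List.pyGetD_of_nonneg]
  have h2 := psums_getElem? S l 0 k.toNat (by omega)
  rw [List.getD_eq_getElem?_getD, h2]
  · simp
  · exact h0

theorem prefdiff_eq (S : PySem.Set Int) (n t nt : Int)
    (h0 : 0 ≤ t) (h1 : t ≤ nt) (h2 : nt ≤ n) :
    PySem.List.pyGetD (bPref S n) nt 0 - PySem.List.pyGetD (bPref S n) t 0
      = ((PySem.List.pyRange t nt 1).countP (fun c => PySem.Set.contains S c) : Int) := by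
  have hlen : (PySem.List.pyRange 0 n 1).length = n.toNat := by
    rw [PySem.List.length_pyRange_one]
    omega
  rw [bPref_eq]
  rw [getD_pref _ _ nt (by omega) (by rw [hlen]; omega),
      getD_pref _ _ t h0 (by rw [hlen]; omega)]
  have htake : ∀ (m : Int), 0 ≤ m → m ≤ n →
      (PySem.List.pyRange 0 n 1).take m.toNat = PySem.List.pyRange 0 m 1 := by
    intro m hm0 hmn
    rw [PySem.List.pyRange_one_append 0 m n hm0 hmn, List.take_left']
    rw [PySem.List.length_pyRange_one]
    omega
  rw [htake nt (by omega) h2, htake t h0 (by omega)]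
  rw [PySem.List.pyRange_one_append 0 t nt h0 h1, List.countP_append]
  push_cast
  ring

theorem spanlen_eq (S : PySem.Set Int) (t nt : Int) (hnd : S.Nodup) :
    (S.filter (fun c => decide (t ≤ c) && decide (c < nt))).length
      = (PySem.List.pyRange t nt 1).countP (fun c => PySem.Set.contains S c) := by
  rw [List.countP_eq_length_filter]
  apply List.Perm.length_eq
  rw [List.perm_ext_iff_of_nodup (List.Nodup.filter _ hnd)
      (List.Nodup.filter _ (PySem.List.nodup_pyRange_one t nt))]
  intro c
  simp only [List.mem_filter, PySem.List.mem_pyRange_one,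
    Bool.and_eq_true, decide_eq_true_eq, PySem.Set.contains_iff]
  tauto

theorem step_eq (top_row : List String) (sub_rows : List (List String)) (n : Int)
    (acc : List String) (it : Int × Int) (hit : it ∈ PySem.List.enumerate (aTopCols top_row n) 0) :
    aPrimaryStep top_row (aTopCols top_row n) (aSubCols sub_rows n) n acc it
      = bPrimaryStep top_row (aTopCols top_row n) (bPref (aSubCols sub_rows n) n) n acc it := by
  rcases (PySem.List.mem_enumerate_iff _ _ _).1 hit with ⟨k, hk, hitEq⟩
  have hbnd : ∀ x ∈ aTopCols top_row n, 0 ≤ x ∧ x < n := by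
    intro x hx
    have hx1 := (List.mem_filter.1 hx).1
    rwa [PySem.List.mem_pyRange_one] at hx1
  have hpw : (aTopCols top_row n).Pairwise (· < ·) :=
    List.Pairwise.filter _ (PySem.List.pairwise_lt_pyRange_one 0 n)
  have hnd := nodup_aSubCols sub_rows n
  subst hitEq
  simp only [aPrimaryStep, bPrimaryStep]
  have hmem : (aTopCols top_row n)[k] ∈ aTopCols top_row n := List.getElem_mem _
  have htb := hbnd _ hmem
  by_cases hlt : (0 : Int) + k + 1 < PySem.List.len (aTopCols top_row n)
  · simp only [hlt, if_true]
    have hk1 : k + 1 < (aTopCols top_row n).length := by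
      rw [PySem.List.len_eq] at hlt
      omega
    have hgd : PySem.List.pyGetD (aTopCols top_row n) ((0 : Int) + k + 1) 0
        = (aTopCols top_row n)[k + 1] := by
      have : (0 : Int) + k + 1 = ((k + 1 : Nat) : Int) := by push_cast; ring
      rw [this, PySem.List.pyGetD_natCast, List.getD_eq_getElem _ _ hk1]
    rw [hgd]
    have hlt2 : (aTopCols top_row n)[k] < (aTopCols top_row n)[k + 1] :=
      List.pairwise_iff_getElem.mp hpw k (k + 1) hk hk1 (by omega)
    have hub := (hbnd _ (List.getElem_mem hk1)).2
    have hcond : PySem.List.len ((aSubCols sub_rows n).filter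
          (fun c => decide ((aTopCols top_row n)[k] ≤ c) && decide (c < (aTopCols top_row n)[k + 1])))
        = PySem.List.pyGetD (bPref (aSubCols sub_rows n) n) ((aTopCols top_row n)[k + 1]) 0
          - PySem.List.pyGetD (bPref (aSubCols sub_rows n) n) ((aTopCols top_row n)[k]) 0 := by
      rw [PySem.List.len_eq, spanlen_eq _ _ _ hnd,
        prefdiff_eq _ n _ _ htb.1 (le_of_lt hlt2) (by omega)]
    rw [hcond]
  · simp only [hlt, if_false]
    have hcond : PySem.List.len ((aSubCols sub_rows n).filter
          (fun c => decide ((aTopCols top_row n)[k] ≤ c) && decide (c < n)))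
        = PySem.List.pyGetD (bPref (aSubCols sub_rows n) n) n 0
          - PySem.List.pyGetD (bPref (aSubCols sub_rows n) n) ((aTopCols top_row n)[k]) 0 := by
      rw [PySem.List.len_eq, spanlen_eq _ _ _ hnd,
        prefdiff_eq _ n _ _ htb.1 (le_of_lt htb.2) (by omega)]
    rw [hcond]

theorem dedup_fold (l : List String) (q : String) (acc : List String) :
    l.foldl (fun d p => if decide (d = []) || (PySem.List.pyGetD d (-1) "" != p) then d ++ [p] else d)
        (acc ++ [q])
      = (acc ++ [q]) ++ chainDedup q l := by
  induction l generalizing q acc with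
  | nil => simp [chainDedup]
  | cons p l ih =>
    simp only [List.foldl_cons]
    have hget : PySem.List.pyGetD (acc ++ [q]) (-1) "" = q := by
      rw [PySem.List.pyGetD_neg_ofNat (acc ++ [q]) 1 "" (by omega) (by simp)]
      simp
    have hne : decide ((acc ++ [q]) = ([] : List String)) = false := by simp
    rw [hget, hne, Bool.false_or]
    by_cases hqp : q = p
    · subst hqp
      simp only [bne_self_eq_false, Bool.false_eq_true, if_false]
      rw [ih q acc]
      simp [chainDedup]
    · have hb : (q != p) = true := by simp [bne_iff_ne, hqp]
      have hb2 : (p != q) = true := by simp [bne_iff_ne]; exact fun h => hqp h.symm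
      rw [hb, if_pos rfl]
      have h2 := ih p (acc ++ [q])
      rw [h2]
      simp [chainDedup, hb2]

theorem zip_filterMap_chain (l : List String) (h : String) :
    ((h :: l).zip l).filterMap (fun qp => if qp.2 != qp.1 then some qp.2 else none)
      = chainDedup h l := by
  induction l generalizing h with
  | nil => rfl
  | cons p t ih =>
    simp only [List.zip_cons_cons, List.filterMap_cons]
    by_cases hph : (p != h) = true
    · simp only [hph, if_true, chainDedup, ih]
    · simp only [Bool.not_eq_true] at hph
      simp only [hph, Bool.false_eq_true, if_false, chainDedup, ih]

theorem parts_fold (sub_rows : List (List String)) (c : Int) (init : List String) :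
    sub_rows.foldl (fun parts sr =>
      let v := if decide (c < PySem.List.len sr) && (PySem.List.pyGetD sr c "" != "")
               then flattenWs (PySem.List.pyGetD sr c "") else ""
      if v != "" then parts ++ [v] else parts) init
      = init ++ ((sub_rows.map (fun sr =>
            if decide (c < PySem.List.len sr) && (PySem.List.pyGetD sr c "" != "")
            then flattenWs (PySem.List.pyGetD sr c "") else "")).filter (fun p => p != "")) := by
  induction sub_rows generalizing init with
  | nil => simp
  | cons x l ih =>
    simp only [List.foldl_cons, List.map_cons, List.filter_cons]
    by_cases hx : ((if decide (c < PySem.List.len x) && (PySem.List.pyGetD x c "" != "")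
        then flattenWs (PySem.List.pyGetD x c "") else "") != "") = true
    · simp only [hx, if_true, ih]
      simp
    · simp only [Bool.not_eq_true] at hx
      simp only [hx, Bool.false_eq_true, if_false, ih]

theorem mapfilter_eq (sub_rows : List (List String)) (c : Int) :
    ((sub_rows.map (fun sr =>
        if decide (c < PySem.List.len sr) && (PySem.List.pyGetD sr c "" != "")
        then flattenWs (PySem.List.pyGetD sr c "") else "")).filter (fun p => p != ""))
    = ((sub_rows.filterMap (fun sr =>
        if decide (c < PySem.List.len sr) && (PySem.List.pyGetD sr c "" != "")
        then some (flattenWs (PySem.List.pyGetD sr c "")) else none)).filter (fun p => p != "")) := by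
  induction sub_rows with
  | nil => rfl
  | cons x l ih =>
    simp only [List.map_cons, List.filterMap_cons]
    by_cases hx : (decide (c < PySem.List.len x) && (PySem.List.pyGetD x c "" != "")) = true
    · simp only [hx, if_true, List.filter_cons]
      rw [ih]
    · simp only [hx, Bool.false_eq_true, if_false, List.filter_cons]
      simp only [bne_self_eq_false, Bool.false_eq_true, if_false]
      exact ih

theorem dedup_eq (parts : List String) :
    parts.foldl (fun d p =>
        if decide (d = []) || (PySem.List.pyGetD d (-1) "" != p) then d ++ [p] else d) []
      = bDedupAdjacent parts := by
  cases parts with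
  | nil => rfl
  | cons h t =>
    simp only [List.foldl_cons]
    have h1 : (if (decide True || (PySem.List.pyGetD ([] : List String) (-1) "" != h)) = true
        then ([] : List String) ++ [h] else []) = [h] := by simp
    rw [h1]
    have h2 := dedup_fold t h []
    simp only [List.nil_append] at h2
    rw [h2]
    simp only [bDedupAdjacent, zip_filterMap_chain, List.singleton_append]

theorem compose_eq (primary : List String) (sub_rows : List (List String)) (c : Int) :
    aCompose primary sub_rows c = bCompose primary sub_rows c := by
  simp only [aCompose, bCompose]
  rw [parts_fold, mapfilter_eq, dedup_eq]
  congr 1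
  congr 1
  rw [List.filter_cons]
  by_cases hpc : (PySem.List.pyGetD primary c "" != "") = true
  · simp only [hpc, if_true, List.singleton_append]
  · simp only [Bool.not_eq_true] at hpc
    simp [hpc]

-- ===== VERDICT (by name: the statement is the Claim_ definition above) =====
theorem compose_header_columns_py_spec : Claim_equal_compose_header_columns_py := by
  intro header_rows col_count _
  unfold Spec_compose_header_columns_py
  match header_rows with
  | [] => rfl
  | top_row :: sub_rows =>
    simp only [compose_header_columns_py, compose_header_columns_py_alt]
    rw [PySem.List.foldl_congr_mem
      (l := PySem.List.enumerate (aTopCols top_row col_count) 0)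
      (f := aPrimaryStep top_row (aTopCols top_row col_count) (aSubCols sub_rows col_count) col_count)
      (g := bPrimaryStep top_row (aTopCols top_row col_count) (bPref (aSubCols sub_rows col_count) col_count) col_count)
      (init := List.replicate col_count.toNat "")
      (fun acc it hit => step_eq top_row sub_rows col_count acc it hit)]
    rw [PySem.List.foldl_append_singleton_eq_map]
    simp only [List.nil_append]
    exact List.map_congr_left (fun c _ => compose_eq _ sub_rows c)
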